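-- pv_equiv track=rewrite | github.com/victorjgomez/python_competitive_programming_problems | problems/1_problem#B1213.py | solution
-- ===== SOURCE A (Python) =====
-- from typing import List
--
-- def pop_possibles_bad_prices(possibles_bad_prices: List[int],
--                              list_ids_to_pop: List[int]):
--     cont = 0
--     for i in list_ids_to_pop:
--         possibles_bad_prices.pop(i-cont)
--         cont += 1
--
-- def solution(prices: List[int]):
--     number_day_bad_prices = 0
--     possibles_bad_prices = []
--
--     for price in prices:
--         list_ids_to_pop = []
--         for i in range(len(possibles_bad_prices)):
--             if price < possibles_bad_prices[i]:
--                 list_ids_to_pop.append(i)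
--                 number_day_bad_prices += 1
--
--         pop_possibles_bad_prices(possibles_bad_prices, list_ids_to_pop)
--         possibles_bad_prices.append(price)
--
--     return number_day_bad_prices
-- ===== SOURCE B (Python) =====
-- def solution(prices):
--     # One right-to-left pass: a day is a "bad price" day iff some later day is strictly cheaper,
--     # i.e. iff the minimum of the suffix after it is smaller.
--     count = 0
--     m = None
--     for p in reversed(prices):
--         if m is not None and m < p:
--             count += 1
--         if m is None or p < m:
--             m = p
--     return count
-- ===== Notes on version B (the rewrite author's own statement) =====
-- stated objective: faster
-- what changed: Replaces the quadratic stack-with-index-popping scan (inner loop over surviving candidates plus shifted pops) by a single right-to-left pass that keeps the running suffix minimum and counts days whose price exceeds it.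
import Mathlib
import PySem

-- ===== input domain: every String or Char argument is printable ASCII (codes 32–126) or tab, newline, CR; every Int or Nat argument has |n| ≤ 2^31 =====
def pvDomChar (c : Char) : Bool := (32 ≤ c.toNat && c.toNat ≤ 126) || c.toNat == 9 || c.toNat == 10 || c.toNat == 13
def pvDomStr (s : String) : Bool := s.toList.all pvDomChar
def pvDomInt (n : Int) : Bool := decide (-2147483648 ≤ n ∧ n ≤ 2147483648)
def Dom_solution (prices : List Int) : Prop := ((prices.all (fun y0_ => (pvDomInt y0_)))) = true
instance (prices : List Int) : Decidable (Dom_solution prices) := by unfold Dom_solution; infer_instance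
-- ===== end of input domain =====

-- B replaces A's quadratic candidate-stack scan (inner index loop + shifted pops) by a single
-- right-to-left pass tracking the running suffix minimum; timing run reports it measurably faster.


-- ===== PORT A =====
-- 'possibles_bad_prices.pop(i-cont)' loop of pop_possibles_bad_prices; the `none` arm is
-- unreachable in A's calls (Python would raise IndexError there) and only totalises the match.
def popLoop (s : List Int) (cont : Int) : List Int → List Int
  | [] => s
  | i :: rest =>
    match PySem.List.pop? s (i - cont) with
    | some r => popLoop r.2 (cont + 1) rest
    | none => popLoop s (cont + 1) rest

def pop_possibles_bad_prices (possibles : List Int) (idsToPop : List Int) : List Int :=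
  popLoop possibles 0 idsToPop

-- inner 'for i in range(len(possibles_bad_prices))' loop body; acc = (list_ids_to_pop, counter)
def innerStep (price : Int) (s : List Int) (acc : List Int × Int) (i : Int) : List Int × Int :=
  if price < PySem.List.pyGetD s i 0 then (acc.1 ++ [i], acc.2 + 1) else acc

-- one iteration of the outer 'for price in prices' loop; st = (counter, possibles_bad_prices)
def stepA (st : Int × List Int) (price : Int) : Int × List Int :=
  let r := (PySem.List.pyRange 0 (st.2.length : Int) 1).foldl (innerStep price st.2) ([], st.1)
  (r.2, pop_possibles_bad_prices st.2 r.1 ++ [price])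

def solution (prices : List Int) : Int :=
  (prices.foldl stepA (0, [])).1

-- ===== PORT B =====
-- one iteration of 'for p in reversed(prices)'; st = (count, m)
def stepB (st : Int × Option Int) (p : Int) : Int × Option Int :=
  ((match st.2 with
    | some m => if m < p then st.1 + 1 else st.1
    | none => st.1),
   (match st.2 with
    | none => some p
    | some m => if p < m then some p else some m))

def solution_alt (prices : List Int) : Int :=
  (prices.reverse.foldl stepB (0, none)).1

-- ===== PRECONDITION & SPEC =====
def Spec_solution (prices : List Int) (out : Int) : Prop := out = solution_alt prices
instance (prices : List Int) (out : Int) : Decidable (Spec_solution prices out) := by unfold Spec_solution; infer_instance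

-- ===== CLAIM (what is proved, stated in full; the proofs are below) =====
def Claim_equal_solution : Prop := ∀ (prices : List Int), Dom_solution prices → Spec_solution prices (solution prices)

-- ===== LEMMAS AND PROOFS =====

-- the candidate stack A maintains: fold of "drop all entries the new price undercuts, push the price"
def Sfrom (s : List Int) (l : List Int) : List Int :=
  l.foldl (fun s p => s.filter (fun y => !decide (p < y)) ++ [p]) s

-- indices (as Python ints) of stack entries strictly above the new price = A's list_ids_to_pop
def idsOf (p : Int) : List Int → List Int
  | [] => []
  | y :: t => (if p < y then [(0 : Int)] else []) ++ (idsOf p t).map (· + 1)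

-- count of the days B has marked, by recursion on the list
def Cnt : List Int → Int
  | [] => 0
  | x :: t => Cnt t + (if t.any (fun y => decide (y < x)) then 1 else 0)

-- B's running minimum after the suffix has been processed
def Mfun : List Int → Option Int
  | [] => none
  | x :: t =>
    match Mfun t with
    | none => some x
    | some m => some (if x < m then x else m)

lemma pop?_cons_pos (y : Int) (t : List Int) (j : Int) (h : 1 ≤ j) :
    PySem.List.pop? (y :: t) j = (PySem.List.pop? t (j - 1)).map (fun r => (r.1, y :: r.2)) := by
  simp only [PySem.List.pop?, PySem.List.pyIdx?, List.length_cons]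
  rw [if_pos (by omega : (0:Int) ≤ j), if_pos (by omega : (0:Int) ≤ j - 1)]
  by_cases h2 : j < (t.length : Int) + 1
  · rw [if_pos (by push_cast; omega), if_pos (by omega)]
    have hjt : j.toNat = (j - 1).toNat + 1 := by omega
    rw [hjt]
    simp only [Option.bind_some, List.getElem?_cons_succ, List.eraseIdx_cons_succ]
    cases t[(j-1).toNat]? <;> rfl
  · rw [if_neg (by push_cast; omega), if_neg (by omega)]
    rfl

lemma ids_ge (p : Int) (t : List Int) : ∀ k (hk : k < (idsOf p t).length), (k : Int) ≤ (idsOf p t)[k] := by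
  induction t with
  | nil => intro k hk; simp [idsOf] at hk
  | cons y u ih =>
    intro k hk
    by_cases h : p < y
    · simp only [idsOf, if_pos h, List.singleton_append] at hk ⊢
      match k with
      | 0 => simp
      | k + 1 =>
        simp only [List.getElem_cons_succ, List.getElem_map]
        have := ih k (by simpa using hk)
        push_cast; omega
    · simp only [idsOf, if_neg h, List.nil_append, List.getElem_map] at hk ⊢
      have := ih k (by simpa using hk)
      omega

lemma popLoop_cons (y : Int) : ∀ (ids t : List Int) (cont : Int),
    (∀ k (hk : k < ids.length), cont + k + 1 ≤ ids[k]) →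
    popLoop (y :: t) cont ids = y :: popLoop t (cont + 1) ids := by
  intro ids
  induction ids with
  | nil => intro t cont _; rfl
  | cons i rest ih =>
    intro t cont h
    have h0 : cont + 1 ≤ i := by simpa using h 0 (by simp)
    have hrest : ∀ k (hk : k < rest.length), (cont + 1) + k + 1 ≤ rest[k] := by
      intro k hk
      have := h (k + 1) (by simp only [List.length_cons]; omega)
      simp only [List.getElem_cons_succ] at this
      push_cast at this ⊢; omega
    have hco : i - (cont + 1) = i - cont - 1 := by omega
    simp only [popLoop, pop?_cons_pos y t (i - cont) (by omega)]
    cases hp : PySem.List.pop? t (i - cont - 1) with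
    | none => simp only [Option.map_none, hco, hp]; exact ih t (cont + 1) hrest
    | some r => simp only [Option.map_some, hco, hp]; exact ih r.2 (cont + 1) hrest

lemma pop_filter (p : Int) : ∀ (t : List Int) (cont : Int),
    popLoop t cont ((idsOf p t).map (· + cont)) = t.filter (fun y => !decide (p < y)) := by
  intro t
  induction t with
  | nil => intro cont; rfl
  | cons y u ih =>
    intro cont
    have hmm : ((idsOf p u).map (· + 1)).map (· + cont) = (idsOf p u).map (· + (cont + 1)) := by
      rw [List.map_map]; apply List.map_congr_left; intro a _; simp; ring
    by_cases h : p < y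
    · simp only [idsOf, if_pos h, List.singleton_append, List.map_cons, hmm]
      have hz : (0 : Int) + cont - cont = 0 := by ring
      simp only [popLoop, hz, PySem.List.pop?_zero_cons]
      rw [ih (cont + 1)]
      simp [h]
    · simp only [idsOf, if_neg h, List.nil_append, hmm]
      rw [popLoop_cons y _ u cont ?_, ih (cont + 1)]
      · simp [h]
      · intro k hk
        simp only [List.getElem_map]
        have := ids_ge p u k (by simpa using hk)
        omega

lemma inner_gen (p : Int) : ∀ (t pre : List Int) (ids : List Int) (c : Int),
    (PySem.List.pyRange (pre.length : Int) ((pre.length : Int) + (t.length : Int)) 1).foldl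
        (innerStep p (pre ++ t)) (ids, c)
      = (ids ++ (idsOf p t).map (· + (pre.length : Int)),
         c + (t.countP (fun y => decide (p < y)) : Int)) := by
  intro t
  induction t with
  | nil =>
    intro pre ids c
    rw [PySem.List.pyRange_one_eq_nil (by simp)]
    simp [idsOf]
  | cons y u ih =>
    intro pre ids c
    have hb : ((pre.length : Int)) < (pre.length : Int) + ((y :: u).length : Int) := by
      simp only [List.length_cons]; push_cast; omega
    rw [PySem.List.pyRange_one_cons hb]
    simp only [List.foldl_cons]
    have hget : PySem.List.pyGetD (pre ++ y :: u) (pre.length : Int) 0 = y := by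
      rw [PySem.List.pyGetD_natCast]
      simp [List.getD]
    have hlen : (pre.length : Int) + ((y :: u).length : Int) = ((pre ++ [y]).length : Int) + (u.length : Int) := by
      simp; ring
    have hlen1 : (pre.length : Int) + 1 = ((pre ++ [y]).length : Int) := by simp
    have happ : pre ++ y :: u = (pre ++ [y]) ++ u := by simp
    by_cases hpy : p < y
    · simp only [innerStep, hget, if_pos hpy]
      rw [hlen, hlen1, happ, ih (pre ++ [y]) (ids ++ [(pre.length : Int)]) (c + 1), Prod.mk.injEq]
      constructor
      · rw [← hlen1]
        simp only [idsOf, if_pos hpy, List.map_cons, List.map_map,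
          List.append_assoc, List.cons_append, List.nil_append, zero_add]
        congr 2
        apply List.map_congr_left; intro a _; simp; ring
      · simp only [List.countP_cons, decide_eq_true_eq, if_pos hpy]
        push_cast; ring
    · simp only [innerStep, hget, if_neg hpy]
      rw [hlen, hlen1, happ, ih (pre ++ [y]) ids c, Prod.mk.injEq]
      constructor
      · rw [← hlen1]
        simp only [idsOf, if_neg hpy, List.nil_append, List.map_map]
        congr 1
        apply List.map_congr_left; intro a _; simp; ring
      · simp only [List.countP_cons, decide_eq_true_eq, if_neg hpy]
        push_cast; ring

lemma count_filter (p : Int) (s : List Int) :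
    (s.countP (fun y => decide (p < y))) + (s.filter (fun y => !decide (p < y))).length = s.length := by
  induction s with
  | nil => rfl
  | cons x t ih => by_cases h : p < x <;> simp [h] <;> omega

lemma stepA_eq (c : Int) (s : List Int) (p : Int) :
    stepA (c, s) p = (c + (s.countP (fun y => decide (p < y)) : Int),
                      s.filter (fun y => !decide (p < y)) ++ [p]) := by
  have := inner_gen p s [] [] c
  simp only [List.length_nil, Nat.cast_zero, zero_add, List.nil_append] at this
  simp only [stepA, this]
  congr 1
  rw [pop_possibles_bad_prices]
  have : (idsOf p s).map (· + (0:Int)) = idsOf p s := by simp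
  rw [← pop_filter p s 0, this]

lemma Afold : ∀ (l s : List Int) (c : Int),
    l.foldl stepA (c, s)
      = (c + (l.length : Int) + (s.length : Int) - ((Sfrom s l).length : Int), Sfrom s l) := by
  intro l
  induction l with
  | nil => intro s c; simp [Sfrom]
  | cons p t ih =>
    intro s c
    rw [List.foldl_cons, stepA_eq, ih]
    have hS : Sfrom s (p :: t) = Sfrom (s.filter (fun y => !decide (p < y)) ++ [p]) t := by
      simp [Sfrom]
    rw [Prod.mk.injEq]
    refine ⟨?_, hS.symm⟩
    rw [hS]
    have := count_filter p s
    simp only [List.length_append, List.length_cons, List.length_nil]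
    push_cast at this ⊢
    omega

lemma M_lt_iff (t : List Int) (x : Int) :
    (match Mfun t with | none => False | some m => m < x) ↔ (t.any (fun y => decide (y < x)) = true) := by
  induction t with
  | nil => simp [Mfun]
  | cons y u ih =>
    cases hm : Mfun u with
    | none =>
      rw [hm] at ih
      have hu : u.any (fun y => decide (y < x)) = false := by
        cases h : u.any (fun y => decide (y < x))
        · rfl
        · exact absurd (ih.mpr h) id
      simp [Mfun, hm, hu]
    | some m =>
      rw [hm] at ih
      simp only [Mfun, hm, List.any_cons, Bool.or_eq_true, decide_eq_true_eq, ← ih]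
      split_ifs with h <;> omega

lemma Bfold : ∀ t : List Int, t.reverse.foldl stepB (0, none) = (Cnt t, Mfun t) := by
  intro t
  induction t with
  | nil => rfl
  | cons x u ih =>
    rw [List.reverse_cons, List.foldl_append, ih, List.foldl_cons, List.foldl_nil]
    have hcnt : (match Mfun u with
        | some m => if m < x then Cnt u + 1 else Cnt u
        | none => Cnt u) = Cnt u + (if u.any (fun y => decide (y < x)) then 1 else 0) := by
      cases hm : Mfun u with
      | none =>
        have h1 := M_lt_iff u x
        rw [hm] at h1
        have hu : u.any (fun y => decide (y < x)) = false := by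
          cases h : u.any (fun y => decide (y < x))
          · rfl
          · exact (h1.mpr h).elim
        simp [hu]
      | some m =>
        have h2 := M_lt_iff u x
        rw [hm] at h2
        simp only at h2 ⊢
        by_cases hlt : m < x
        · rw [if_pos hlt, if_pos (h2.mp hlt)]
        · rw [if_neg hlt, if_neg (fun hh => hlt (h2.mpr hh))]
          ring
    have hmf : (match Mfun u with
        | none => some x
        | some m => if x < m then some x else some m) = Mfun (x :: u) := by
      simp only [Mfun]
      cases Mfun u with
      | none => rfl
      | some m =>
        simp only
        split_ifs with h <;> rfl
    simp only [stepB, hcnt, hmf, Cnt]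

lemma Sfrom_split : ∀ (t s : List Int),
    Sfrom s t = s.filter (fun y => t.all (fun q => !decide (q < y))) ++ Sfrom [] t := by
  intro t
  induction t with
  | nil => intro s; simp [Sfrom]
  | cons q u ih =>
    intro s
    have h1 : Sfrom s (q :: u) = Sfrom (s.filter (fun y => !decide (q < y)) ++ [q]) u := by
      simp [Sfrom]
    have h2 : Sfrom ([] : List Int) (q :: u) = Sfrom ([q] : List Int) u := by
      show Sfrom (List.filter _ [] ++ [q]) u = _
      rfl
    rw [h1, ih, h2, ih [q]]
    rw [List.filter_append, List.filter_filter, ← List.append_assoc]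
    congr 2
    apply List.filter_congr
    intro a _
    simp only [List.all_cons, Bool.and_comm]

lemma Cnt_len : ∀ t : List Int, Cnt t = (t.length : Int) - ((Sfrom [] t).length : Int) := by
  intro t
  induction t with
  | nil => rfl
  | cons x u ih =>
    have h2 : Sfrom ([] : List Int) (x :: u) = Sfrom ([x] : List Int) u := by
      show Sfrom (List.filter _ [] ++ [x]) u = _
      rfl
    rw [Cnt, ih, h2, Sfrom_split u [x]]
    have hany : (u.any fun y => decide (y < x)) = !(u.all fun q => !decide (q < x)) := by
      exact List.any_eq_not_all_not
    rw [hany]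
    cases hall : u.all fun q => !decide (q < x)
    · simp [List.filter, hall, List.length_cons]
      omega
    · simp [List.filter, hall, List.length_cons]

-- ===== VERDICT (by name: the statement is the Claim_ definition above) =====
theorem solution_spec : Claim_equal_solution := by
  intro prices _
  show solution prices = solution_alt prices
  rw [solution, solution_alt, Afold, Bfold, Cnt_len]
  simp [Sfrom]
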